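-- pv_equiv track=rewrite | github.com/thatdanghill/aoc-2021 | d21/long.py | get_win_length_count
-- ===== SOURCE A (Python) =====
-- uni_combos = {
--     3: 1,
--     4: 3,
--     5: 6,
--     6: 7,
--     7: 6,
--     8: 3,
--     9: 1
-- }
--
-- def get_win_paths(cur_pos, cur_score=0, cur_path='', cur_unis=1):
--     if cur_score >= 21:
--         return {cur_path: cur_unis}
--     dict_list = [
--         get_win_paths(
--             (cur_pos + i - 1) % 10 + 1,
--             cur_score + (cur_pos + i - 1) % 10 + 1,
--             cur_path + str(i),
--             cur_unis * uni_combos[i]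
--         )
--         for i in range(3, 10)
--     ]
--     return {
--         k: v
--         for d in dict_list
--         for k, v in d.items()
--     }
--
-- def get_win_length_count(cur_pos):
--     win_paths = get_win_paths(cur_pos)
--     len_unis = {}
--     for path, unis in win_paths.items():
--         pathlen = len(path)
--         if pathlen in len_unis:
--             len_unis[pathlen] += unis
--         else:
--             len_unis[pathlen] = unis
--     return len_unis
-- ===== SOURCE B (Python) =====
-- def get_win_length_count(cur_pos):
--     # Bottom-up DP over (position, score): table[(pos, score)] maps number of
--     # remaining turns to the count of universes; aggregates the same totals as
--     # the path enumeration, in the same first-occurrence key order.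
--     rolls = [(3, 1), (4, 3), (5, 6), (6, 7), (7, 6), (8, 3), (9, 1)]
--     table = {}
--     for score in range(20, -1, -1):
--         for pos in range(1, 11):
--             res = {}
--             for roll, ways in rolls:
--                 npos = (pos + roll - 1) % 10 + 1
--                 nscore = score + npos
--                 sub = {0: 1} if nscore >= 21 else table[(npos, nscore)]
--                 for turns, unis in sub.items():
--                     res[turns + 1] = res.get(turns + 1, 0) + unis * ways
--             table[(pos, score)] = res
--     return table[((cur_pos - 1) % 10 + 1, 0)]
-- ===== Notes on version B (the rewrite author's own statement) =====
-- stated objective: faster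
-- what changed: A enumerates every winning dice-roll path recursively (one dict entry per path, ~40k string-keyed entries) and then aggregates by path length; B fills a bottom-up DP table over the 210 (position, score) states, each mapping remaining-turn counts to universe counts, merging child profiles once per state.
import Mathlib
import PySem

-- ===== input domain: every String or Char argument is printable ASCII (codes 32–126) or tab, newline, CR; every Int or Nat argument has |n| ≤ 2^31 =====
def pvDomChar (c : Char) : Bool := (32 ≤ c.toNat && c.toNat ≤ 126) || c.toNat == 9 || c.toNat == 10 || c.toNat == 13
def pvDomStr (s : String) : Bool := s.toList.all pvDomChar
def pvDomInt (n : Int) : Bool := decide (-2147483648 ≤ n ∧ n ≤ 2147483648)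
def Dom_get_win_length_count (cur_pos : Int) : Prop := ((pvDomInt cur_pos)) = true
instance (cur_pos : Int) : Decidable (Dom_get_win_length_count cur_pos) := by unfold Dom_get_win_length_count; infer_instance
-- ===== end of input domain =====

-- B replaces A's exponential enumeration of every winning dice-roll path by a
-- bottom-up DP over the 210 (position, score) states; same totals, same key order.

-- ===== PORT A =====
def uni_combos : PySem.Dict Int Int :=
  PySem.Dict.ofList [(3, 1), (4, 3), (5, 6), (6, 7), (7, 6), (8, 3), (9, 1)]

-- Hand-port of Python's dict built from a stream of (key, value) pairs (the dict comprehension in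
-- get_win_paths): first occurrence fixes a key's position, a repeated key overwrites its entry in
-- place (Python's dict insertion rule, = PySem.Dict.insert); the hash set only replaces the linear
-- membership scan so the port evaluates in reasonable time (pvDictOf_items below is the fact used).
def pvDictOf (l : List (String × Int)) : PySem.Dict String Int :=
  PySem.Dict.mk
    ((l.foldl (fun (acc : Std.HashSet String × List (String × Int)) kv =>
        if acc.1.contains kv.1 then
          (acc.1, acc.2.map (fun p => if p.1 == kv.1 then (kv.1, kv.2) else p))
        else (acc.1.insert kv.1, kv :: acc.2)) (∅, [])).2.reverse)

def get_win_paths (cur_pos : Int) (cur_score : Int) (cur_path : String) (cur_unis : Int) :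
    PySem.Dict String Int :=
  if 21 ≤ cur_score then
    PySem.Dict.ofList [(cur_path, cur_unis)]
  else
    -- uni_combos[i]: i always ranges over 3..9, all present, so getD is exact here
    let dict_list := (PySem.List.pyRange 3 10 1).map (fun i =>
      get_win_paths (PySem.Int.mod (cur_pos + i - 1) 10 + 1)
        (cur_score + (PySem.Int.mod (cur_pos + i - 1) 10 + 1))
        (cur_path ++ PySem.Int.toStr i)
        (cur_unis * uni_combos.getD i 0))
    pvDictOf (dict_list.flatMap (fun d => d.items))
termination_by (21 - cur_score).toNat
decreasing_by
  have h := PySem.Int.mod_nonneg (cur_pos + i - 1) (b := 10) (by norm_num)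
  simp only [not_le] at *
  omega

def get_win_length_count (cur_pos : Int) : List (Int × Int) :=
  let win_paths := get_win_paths cur_pos 0 "" 1
  let len_unis : PySem.Dict Int Int :=
    win_paths.items.foldl (fun len_unis pu =>
      let pathlen := PySem.Str.len pu.1
      if len_unis.contains pathlen then
        len_unis.insert pathlen (len_unis.getD pathlen 0 + pu.2)
      else
        len_unis.insert pathlen pu.2) PySem.Dict.empty
  len_unis.items

-- ===== PORT B =====
def get_win_length_count_alt (cur_pos : Int) : List (Int × Int) :=
  let rolls : List (Int × Int) := [(3, 1), (4, 3), (5, 6), (6, 7), (7, 6), (8, 3), (9, 1)]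
  let table : PySem.Dict (Int × Int) (PySem.Dict Int Int) :=
    (PySem.List.pyRange 20 (-1) (-1)).foldl (fun table score =>
      (PySem.List.pyRange 1 11 1).foldl (fun table pos =>
        let res : PySem.Dict Int Int :=
          rolls.foldl (fun res rw =>
            let npos := PySem.Int.mod (pos + rw.1 - 1) 10 + 1
            let nscore := score + npos
            -- table[(npos, nscore)]: the key is always present when nscore < 21, so getD is exact here
            let sub : PySem.Dict Int Int :=
              if 21 ≤ nscore then PySem.Dict.ofList [(0, 1)]
              else table.getD (npos, nscore) PySem.Dict.empty
            sub.items.foldl (fun res tu =>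
              res.insert (tu.1 + 1) (res.getD (tu.1 + 1) 0 + tu.2 * rw.2)) res) PySem.Dict.empty
        table.insert (pos, score) res) table) PySem.Dict.empty
  (table.getD (PySem.Int.mod (cur_pos - 1) 10 + 1, 0) PySem.Dict.empty).items

-- ===== PRECONDITION & SPEC =====
def Spec_get_win_length_count (cur_pos : Int) (out : List (Int × Int)) : Prop := out = get_win_length_count_alt cur_pos
instance (cur_pos : Int) (out : List (Int × Int)) : Decidable (Spec_get_win_length_count cur_pos out) := by unfold Spec_get_win_length_count; infer_instance

-- ===== CLAIM (what is proved, stated in full; the proofs are below) =====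
def Claim_equal_get_win_length_count : Prop := ∀ (cur_pos : Int), Dom_get_win_length_count cur_pos → Spec_get_win_length_count cur_pos (get_win_length_count cur_pos)

-- ===== LEMMAS AND PROOFS =====

-- roll outcomes with their universe multiplicities (3..9 with Dirac-dice weights)
def pvRolls : List (Int × Int) := [(3, 1), (4, 3), (5, 6), (6, 7), (7, 6), (8, 3), (9, 1)]

-- winning paths from (pos, score) as (path-as-char-list, universe-count), in A's DFS order
def pvQ (pos : Int) (score : Int) : List (List Char × Int) :=
  if 21 ≤ score then [([], 1)]
  else pvRolls.flatMap (fun rw =>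
    (pvQ (PySem.Int.mod (pos + rw.1 - 1) 10 + 1)
         (score + (PySem.Int.mod (pos + rw.1 - 1) 10 + 1))).map
      (fun tu => ((PySem.Int.toStr rw.1).toList ++ tu.1, rw.2 * tu.2)))
termination_by (21 - score).toNat
decreasing_by
  have h := PySem.Int.mod_nonneg (pos + rw.1 - 1) (b := 10) (by norm_num)
  simp only [not_le] at *
  omega

-- the same paths by (length, universe-count)
def pvL (pos : Int) (score : Int) : List (Int × Int) :=
  (pvQ pos score).map (fun tu => ((tu.1.length : Int), tu.2))

-- upsert-accumulate a list of (key, value) pairs into a dict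
def pvAgg (l : List (Int × Int)) (d : PySem.Dict Int Int) : PySem.Dict Int Int :=
  l.foldl (fun d p => d.insert p.1 (d.getD p.1 0 + p.2)) d

-- the per-state length profile, as B computes it
def pvS (pos : Int) (score : Int) : PySem.Dict Int Int :=
  if 21 ≤ score then PySem.Dict.ofList [(0, 1)]
  else pvRolls.foldl (fun res rw =>
    let npos := PySem.Int.mod (pos + rw.1 - 1) 10 + 1
    pvAgg ((pvS npos (score + npos)).items.map (fun tu => (tu.1 + 1, tu.2 * rw.2))) res)
    PySem.Dict.empty
termination_by (21 - score).toNat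
decreasing_by
  have h := PySem.Int.mod_nonneg (pos + rw.1 - 1) (b := 10) (by norm_num)
  simp only [not_le] at *
  omega


lemma pvAgg_append (l1 l2 : List (Int × Int)) (d : PySem.Dict Int Int) :
    pvAgg (l1 ++ l2) d = pvAgg l2 (pvAgg l1 d) := by
  simp [pvAgg, List.foldl_append]

lemma pvAgg_getD (l : List (Int × Int)) : ∀ (d : PySem.Dict Int Int) (k : Int),
    (pvAgg l d).getD k 0 = d.getD k 0 + ((l.filter (fun p => p.1 == k)).map Prod.snd).sum := by
  induction l with
  | nil => simp [pvAgg]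
  | cons p t ih =>
    intro d k
    show (pvAgg t (d.insert p.1 (d.getD p.1 0 + p.2))).getD k 0 = _
    rw [ih]
    rw [PySem.Dict.getD_insert]
    by_cases h : p.1 = k
    · simp [h]
      ring
    · have h' : ¬ (k = p.1) := fun hh => h hh.symm
      simp [h, h']

lemma pvAgg_keys (l : List (Int × Int)) (d : PySem.Dict Int Int) :
    (pvAgg l d).keys = PySem.Set.update d.keys (l.map Prod.fst) :=
  PySem.Dict.keys_foldl_insert_key (key := Prod.fst)
    (f := fun d p => d.getD p.1 0 + p.2) l d

lemma pvAgg_nodup (l : List (Int × Int)) (d : PySem.Dict Int Int) (h : d.keys.Nodup) :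
    (pvAgg l d).keys.Nodup :=
  PySem.Dict.nodup_keys_foldl_insert_key (key := Prod.fst)
    (f := fun d p => d.getD p.1 0 + p.2) l d h

lemma nodup_filter_beq (k : Int) : ∀ (ks : List Int), ks.Nodup →
    ks.filter (fun x => x == k) = if k ∈ ks then [k] else [] := by
  intro ks h
  induction ks with
  | nil => simp
  | cons x t ih =>
    have hx : x ∉ t := (List.nodup_cons.mp h).1
    have ht := ih (List.nodup_cons.mp h).2
    by_cases hxk : x = k
    · subst hxk
      simp [ht, hx]
    · have h2 : ¬ (k = x) := fun hh => hxk hh.symm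
      simp [hxk, ht, h2]

lemma dict_filter_sum (d : PySem.Dict Int Int) (h : d.keys.Nodup) (k : Int) :
    ((d.items.filter (fun p => p.1 == k)).map Prod.snd).sum = d.getD k 0 := by
  rw [PySem.Dict.items_eq_map_keys d h 0]
  rw [List.filter_map, List.map_map]
  have hc : (fun p => p.1 == k) ∘ (fun k' => (k', d.getD k' 0)) = fun x => x == k := rfl
  rw [hc, nodup_filter_beq k d.keys h]
  by_cases hm : k ∈ d.keys
  · simp [hm]
  · have : d.contains k = false := by
      rw [PySem.Dict.contains_eq_decide_mem_keys]
      simp [hm]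
    rw [PySem.Dict.getD_of_not_contains d 0 this]
    simp [hm]


lemma set_ofList_map (f : Int → Int) (hf : Function.Injective f) (xs : List Int) :
    PySem.Set.ofList (xs.map f) = (PySem.Set.ofList xs).map f := by
  induction xs using List.reverseRecOn with
  | nil => rfl
  | append_singleton ys x ih =>
    rw [List.map_append, List.map_singleton, PySem.Set.ofList_append_singleton,
        PySem.Set.ofList_append_singleton, ih,
        PySem.Set.add_eq_ite, PySem.Set.add_eq_ite]
    by_cases hm : x ∈ PySem.Set.ofList ys
    · simp [hm, List.mem_map_of_injective hf]
    · simp [hm, List.mem_map_of_injective hf]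

lemma set_update_ofList (s : PySem.Set Int) (ys : List Int) :
    PySem.Set.update s (PySem.Set.ofList ys) = PySem.Set.update s ys := by
  rw [PySem.Set.update_eq_append_filter, PySem.Set.update_eq_append_filter,
      PySem.Set.ofList_ofList]

lemma pvAgg_shift (w : Int) (l : List (Int × Int)) (d : PySem.Dict Int Int)
    (hd : d.keys.Nodup) :
    pvAgg ((pvAgg l PySem.Dict.empty).items.map (fun tu => (tu.1 + 1, tu.2 * w))) d
      = pvAgg (l.map (fun tu => (tu.1 + 1, tu.2 * w))) d := by
  have hinj : Function.Injective (fun k : Int => k + 1) := add_left_injective 1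
  have hknil : (PySem.Dict.empty : PySem.Dict Int Int).keys.Nodup := by
    simp [PySem.Dict.keys, PySem.Dict.empty]
  have hnodA : (pvAgg l PySem.Dict.empty).keys.Nodup := pvAgg_nodup _ _ hknil
  -- keys agree
  have hkeys : (pvAgg ((pvAgg l PySem.Dict.empty).items.map (fun tu => (tu.1 + 1, tu.2 * w))) d).keys
      = (pvAgg (l.map (fun tu => (tu.1 + 1, tu.2 * w))) d).keys := by
    rw [pvAgg_keys, pvAgg_keys]
    have h1 : ((pvAgg l PySem.Dict.empty).items.map (fun tu => (tu.1 + 1, tu.2 * w))).map Prod.fst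
        = ((pvAgg l PySem.Dict.empty).keys).map (fun k => k + 1) := by
      simp [List.map_map, PySem.Dict.keys]
    have h2 : (l.map (fun tu => (tu.1 + 1, tu.2 * w))).map Prod.fst
        = (l.map Prod.fst).map (fun k => k + 1) := by
      simp [List.map_map]
    rw [h1, h2]
    have h3 : (pvAgg l PySem.Dict.empty).keys = PySem.Set.ofList (l.map Prod.fst) := by
      rw [pvAgg_keys]
      rfl
    rw [h3, ← set_ofList_map _ hinj, set_update_ofList]
  -- getD agrees everywhere
  have hgetD : ∀ k, (pvAgg ((pvAgg l PySem.Dict.empty).items.map (fun tu => (tu.1 + 1, tu.2 * w))) d).getD k 0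
      = (pvAgg (l.map (fun tu => (tu.1 + 1, tu.2 * w))) d).getD k 0 := by
    intro k
    rw [pvAgg_getD, pvAgg_getD]
    congr 1
    have hfilter : ∀ (X : List (Int × Int)),
        (X.map (fun tu => (tu.1 + 1, tu.2 * w))).filter (fun p => p.1 == k)
          = (X.filter (fun p => p.1 == k - 1)).map (fun tu => (tu.1 + 1, tu.2 * w)) := by
      intro X
      rw [List.filter_map]
      congr 1
      apply List.filter_congr
      intro p _
      show (p.1 + 1 == k) = (p.1 == k - 1)
      by_cases h : p.1 = k - 1
      · simp [h]
      · have h2 : ¬ (p.1 + 1 = k) := by omega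
        simp [h, h2]
    have hsum : ∀ (X : List (Int × Int)),
        ((X.map (fun tu => (tu.1 + 1, tu.2 * w))).filter (fun p => p.1 == k)).map Prod.snd
          = (X.filter (fun p => p.1 == k - 1)).map (fun tu => tu.2 * w) := by
      intro X
      rw [hfilter, List.map_map]
      rfl
    rw [hsum, hsum]
    rw [show (fun tu : Int × Int => tu.2 * w) = (fun tu : Int × Int => Prod.snd tu * w) from rfl,
        List.sum_map_mul_right, List.sum_map_mul_right]
    congr 1
    rw [dict_filter_sum _ hnodA, pvAgg_getD]
    simp [PySem.Dict.getD]
  -- conclude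
  apply PySem.Dict.ext
  have hnL : (pvAgg ((pvAgg l PySem.Dict.empty).items.map (fun tu => (tu.1 + 1, tu.2 * w))) d).keys.Nodup :=
    pvAgg_nodup _ _ hd
  have hnR : (pvAgg (l.map (fun tu => (tu.1 + 1, tu.2 * w))) d).keys.Nodup :=
    pvAgg_nodup _ _ hd
  rw [PySem.Dict.items_eq_map_keys _ hnL 0, PySem.Dict.items_eq_map_keys _ hnR 0, hkeys]
  apply List.map_congr_left
  intro k _
  rw [hgetD k]


lemma pvL_base (pos score : Int) (h : 21 ≤ score) : pvL pos score = [(0, 1)] := by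
  rw [pvL, pvQ]
  simp [h]

lemma pvL_rec (pos score : Int) (h : ¬ 21 ≤ score) :
    pvL pos score = pvRolls.flatMap (fun rw =>
      (pvL (PySem.Int.mod (pos + rw.1 - 1) 10 + 1)
           (score + (PySem.Int.mod (pos + rw.1 - 1) 10 + 1))).map
        (fun tu => (tu.1 + 1, tu.2 * rw.2))) := by
  rw [pvL, pvQ]
  simp only [h, if_false, List.map_flatMap]
  have h3 : (PySem.Int.toChars 3).length = 1 := by decide
  have h4 : (PySem.Int.toChars 4).length = 1 := by decide
  have h5 : (PySem.Int.toChars 5).length = 1 := by decide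
  have h6 : (PySem.Int.toChars 6).length = 1 := by decide
  have h7 : (PySem.Int.toChars 7).length = 1 := by decide
  have h8 : (PySem.Int.toChars 8).length = 1 := by decide
  have h9 : (PySem.Int.toChars 9).length = 1 := by decide
  simp [pvRolls, pvL, List.map_map, Function.comp_def, h3, h4, h5, h6, h7, h8, h9,
        Int.mul_comm, Int.add_comm]

lemma pvS_base (pos score : Int) (h : 21 ≤ score) :
    pvS pos score = PySem.Dict.ofList [(0, 1)] := by
  rw [pvS]
  simp [h]

lemma pvS_rec (pos score : Int) (h : ¬ 21 ≤ score) :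
    pvS pos score = pvRolls.foldl (fun res rw =>
      pvAgg ((pvS (PySem.Int.mod (pos + rw.1 - 1) 10 + 1)
                  (score + (PySem.Int.mod (pos + rw.1 - 1) 10 + 1))).items.map
               (fun tu => (tu.1 + 1, tu.2 * rw.2))) res) PySem.Dict.empty := by
  rw [pvS]
  simp [h]

lemma pv_empty_keys_nodup : (PySem.Dict.empty : PySem.Dict Int Int).keys.Nodup := by
  simp [PySem.Dict.keys, PySem.Dict.empty]

lemma pv_fold (rs : List (Int × Int)) (pos score : Int) (res : PySem.Dict Int Int)
    (hres : res.keys.Nodup)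
    (hS : ∀ rw ∈ rs, pvS (PySem.Int.mod (pos + rw.1 - 1) 10 + 1)
            (score + (PySem.Int.mod (pos + rw.1 - 1) 10 + 1))
          = pvAgg (pvL (PySem.Int.mod (pos + rw.1 - 1) 10 + 1)
                       (score + (PySem.Int.mod (pos + rw.1 - 1) 10 + 1))) PySem.Dict.empty) :
    rs.foldl (fun res rw =>
      pvAgg ((pvS (PySem.Int.mod (pos + rw.1 - 1) 10 + 1)
                  (score + (PySem.Int.mod (pos + rw.1 - 1) 10 + 1))).items.map
               (fun tu => (tu.1 + 1, tu.2 * rw.2))) res) res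
    = pvAgg (rs.flatMap (fun rw =>
        (pvL (PySem.Int.mod (pos + rw.1 - 1) 10 + 1)
             (score + (PySem.Int.mod (pos + rw.1 - 1) 10 + 1))).map
          (fun tu => (tu.1 + 1, tu.2 * rw.2)))) res := by
  induction rs generalizing res with
  | nil => simp [pvAgg]
  | cons rw rs' ih =>
    rw [List.foldl_cons, List.flatMap_cons, pvAgg_append]
    rw [hS rw (List.mem_cons_self), pvAgg_shift _ _ _ hres]
    exact ih _ (pvAgg_nodup _ _ hres) (fun r hr => hS r (List.mem_cons_of_mem _ hr))

lemma pvM : ∀ (n : Nat) (pos score : Int), (21 - score).toNat ≤ n →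
    pvS pos score = pvAgg (pvL pos score) PySem.Dict.empty := by
  intro n
  induction n with
  | zero =>
    intro pos score h
    have hb : 21 ≤ score := by omega
    rw [pvS_base _ _ hb, pvL_base _ _ hb]
    decide
  | succ n ih =>
    intro pos score h
    by_cases hb : 21 ≤ score
    · rw [pvS_base _ _ hb, pvL_base _ _ hb]
      decide
    · rw [pvS_rec _ _ hb, pvL_rec _ _ hb]
      apply pv_fold _ _ _ _ pv_empty_keys_nodup
      intro rw _
      apply ih
      have hm := PySem.Int.mod_nonneg (pos + rw.1 - 1) (b := 10) (by norm_num)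
      omega


lemma pv_nodup_flatMap_heads {β : Type} (c : β → Char) (f : β → List (List Char)) :
    ∀ (l : List β), (l.map c).Nodup → (∀ b ∈ l, (f b).Nodup) →
    (l.flatMap (fun b => (f b).map (c b :: ·))).Nodup := by
  intro l
  induction l with
  | nil => simp
  | cons b t ih =>
    intro hc hf
    rw [List.flatMap_cons]
    rw [List.nodup_append]
    refine ⟨?_, ?_, ?_⟩
    · exact List.Nodup.map (fun x y h => by injection h) (hf b List.mem_cons_self)
    · exact ih (List.nodup_cons.mp hc).2 (fun b' hb' => hf b' (List.mem_cons_of_mem _ hb'))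
    · intro x hx1 y hy2 hxy
      subst hxy
      obtain ⟨u, _, rfl⟩ := List.mem_map.mp hx1
      obtain ⟨b', hb', hmem⟩ := List.mem_flatMap.mp hy2
      obtain ⟨u', _, heq⟩ := List.mem_map.mp hmem
      have hcb : c b ≠ c b' := by
        intro hcc
        exact (List.nodup_cons.mp hc).1 (hcc ▸ List.mem_map_of_mem hb')
      exact hcb (by injection heq.symm)

def pvDigit : Int × Int → Char := fun rw => ((PySem.Int.toStr rw.1).toList).headI

lemma pv_rolls_digit : ∀ rw ∈ pvRolls, (PySem.Int.toStr rw.1).toList = [pvDigit rw] := by decide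

lemma pv_rolls_digit_nodup : (pvRolls.map pvDigit).Nodup := by decide

lemma pvQ_keys_nodup : ∀ (n : Nat) (pos score : Int), (21 - score).toNat ≤ n →
    ((pvQ pos score).map Prod.fst).Nodup := by
  intro n
  induction n with
  | zero =>
    intro pos score h
    have hb : 21 ≤ score := by omega
    rw [pvQ]
    simp [hb]
  | succ n ih =>
    intro pos score h
    by_cases hb : 21 ≤ score
    · rw [pvQ]; simp [hb]
    · rw [pvQ]
      simp only [hb, if_false, List.map_flatMap]
      -- rewrite each branch into head-cons form
      have hbr : ∀ rw ∈ pvRolls,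
          List.map Prod.fst ((pvQ (PySem.Int.mod (pos + rw.1 - 1) 10 + 1)
              (score + (PySem.Int.mod (pos + rw.1 - 1) 10 + 1))).map
            (fun tu => ((PySem.Int.toStr rw.1).toList ++ tu.1, rw.2 * tu.2)))
          = ((pvQ (PySem.Int.mod (pos + rw.1 - 1) 10 + 1)
              (score + (PySem.Int.mod (pos + rw.1 - 1) 10 + 1))).map Prod.fst).map
              (pvDigit rw :: ·) := by
        intro rw hrw
        rw [List.map_map, List.map_map]
        apply List.map_congr_left
        intro tu _
        show (PySem.Int.toStr rw.1).toList ++ tu.1 = pvDigit rw :: tu.1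
        rw [pv_rolls_digit rw hrw]
        rfl
      rw [List.flatMap_def, List.map_congr_left hbr, ← List.flatMap_def]
      apply pv_nodup_flatMap_heads pvDigit _ _ pv_rolls_digit_nodup
      intro rw _
      apply ih
      have hm := PySem.Int.mod_nonneg (pos + rw.1 - 1) (b := 10) (by norm_num)
      omega


lemma pv_str_append (p a : String) (l : List Char) :
    (p ++ a) ++ String.ofList l = p ++ String.ofList (a.toList ++ l) := by
  apply String.toList_inj.mp
  simp

lemma pv_ofList_inj (p : String) :
    Function.Injective (fun l : List Char => p ++ String.ofList l) := by
  intro a b h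
  have h2 := congrArg String.toList h
  simpa using h2

lemma pv_rolls_getD : ∀ rw ∈ pvRolls, uni_combos.getD rw.1 0 = rw.2 := by decide

lemma pv_pyRange39 : PySem.List.pyRange 3 10 1 = pvRolls.map Prod.fst := by decide

lemma pvDictOf_go : ∀ (l : List (String × Int)) (seen : Std.HashSet String)
    (rev : List (String × Int)), (l.map Prod.fst).Nodup →
    (∀ kv ∈ l, seen.contains kv.1 = false) →
    (l.foldl (fun (acc : Std.HashSet String × List (String × Int)) kv =>
        if acc.1.contains kv.1 then
          (acc.1, acc.2.map (fun p => if p.1 == kv.1 then (kv.1, kv.2) else p))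
        else (acc.1.insert kv.1, kv :: acc.2)) (seen, rev)).2 = l.reverse ++ rev := by
  intro l
  induction l with
  | nil => simp
  | cons kv t ih =>
    intro seen rev hnd hf
    rw [List.foldl_cons, if_neg (by simp [hf kv List.mem_cons_self])]
    rw [ih _ _ (List.nodup_cons.mp hnd).2 ?fresh]
    · simp
    case fresh =>
      intro kv' hkv'
      rw [Std.HashSet.contains_insert]
      have hne : kv.1 ≠ kv'.1 := by
        intro he
        exact (List.nodup_cons.mp hnd).1 (he ▸ List.mem_map_of_mem hkv')
      simp [hne, hf kv' (List.mem_cons_of_mem _ hkv')]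

lemma pvDictOf_items (l : List (String × Int)) (h : (l.map Prod.fst).Nodup) :
    (pvDictOf l).items = l := by
  show ((l.foldl _ ((∅ : Std.HashSet String), ([] : List (String × Int)))).2.reverse) = l
  rw [pvDictOf_go l ∅ [] h (by intro kv _; simp)]
  simp

lemma pvA_items : ∀ (n : Nat) (pos score : Int) (path : String) (unis : Int),
    (21 - score).toNat ≤ n →
    (get_win_paths pos score path unis).items
      = (pvQ pos score).map (fun tu => (path ++ String.ofList tu.1, unis * tu.2)) := by
  intro n
  induction n with
  | zero =>
    intro pos score path unis h
    have hb : 21 ≤ score := by omega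
    rw [get_win_paths, pvQ]
    simp [hb, PySem.Dict.ofList, PySem.Dict.update, PySem.Dict.insert, PySem.Dict.contains,
          PySem.Dict.empty]
  | succ n ih =>
    intro pos score path unis h
    by_cases hb : 21 ≤ score
    · rw [get_win_paths, pvQ]
      simp [hb, PySem.Dict.ofList, PySem.Dict.update, PySem.Dict.insert, PySem.Dict.contains,
            PySem.Dict.empty]
    · have hmeas : ∀ rw : Int × Int, (21 - (score + (PySem.Int.mod (pos + rw.1 - 1) 10 + 1))).toNat ≤ n := by
        intro rw
        have hm := PySem.Int.mod_nonneg (pos + rw.1 - 1) (b := 10) (by norm_num)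
        omega
      rw [get_win_paths]
      simp only [hb, if_false]
      rw [pv_pyRange39, List.map_map, List.flatMap_def, List.map_map]
      have hbr : ∀ rw ∈ pvRolls,
          ((fun d => PySem.Dict.items d) ∘
            (fun i => get_win_paths (PySem.Int.mod (pos + i - 1) 10 + 1)
              (score + (PySem.Int.mod (pos + i - 1) 10 + 1))
              (path ++ PySem.Int.toStr i)
              (unis * uni_combos.getD i 0)) ∘ Prod.fst) rw
          = (pvQ (PySem.Int.mod (pos + rw.1 - 1) 10 + 1)
               (score + (PySem.Int.mod (pos + rw.1 - 1) 10 + 1))).map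
              (fun tu => (path ++ String.ofList ((PySem.Int.toStr rw.1).toList ++ tu.1),
                          unis * (rw.2 * tu.2))) := by
        intro rw hrw
        show (get_win_paths _ _ (path ++ PySem.Int.toStr rw.1) (unis * uni_combos.getD rw.1 0)).items = _
        rw [ih _ _ _ _ (hmeas rw)]
        apply List.map_congr_left
        intro tu _
        rw [pv_rolls_getD rw hrw, pv_str_append, Int.mul_assoc]
      rw [List.map_congr_left hbr]
      -- the key strings of the concatenated branch lists are exactly the pvQ keys, prefixed
      have hkeys : (pvRolls.map (fun rw =>
          (pvQ (PySem.Int.mod (pos + rw.1 - 1) 10 + 1)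
               (score + (PySem.Int.mod (pos + rw.1 - 1) 10 + 1))).map
            (fun tu => (path ++ String.ofList ((PySem.Int.toStr rw.1).toList ++ tu.1),
                        unis * (rw.2 * tu.2))))).flatten
          = (pvQ pos score).map (fun tu => (path ++ String.ofList tu.1, unis * tu.2)) := by
        rw [pvQ]
        simp only [hb, if_false, List.flatMap_def, List.map_flatten, List.map_map]
        refine congrArg List.flatten (List.map_congr_left ?_)
        intro rw _
        show _ = List.map (fun tu => (path ++ String.ofList tu.1, unis * tu.2))
            (List.map (fun tu => ((PySem.Int.toStr rw.1).toList ++ tu.1, rw.2 * tu.2))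
              (pvQ (PySem.Int.mod (pos + rw.1 - 1) 10 + 1)
                   (score + (PySem.Int.mod (pos + rw.1 - 1) 10 + 1))))
        rw [List.map_map]
        exact List.map_congr_left (fun tu _ => rfl)
      rw [hkeys]
      -- now evaluate Dict.ofList on a fresh-keys pair list
      have hnodup : (((pvQ pos score).map (fun tu => (path ++ String.ofList tu.1, unis * tu.2))).map
          Prod.fst).Nodup := by
        rw [List.map_map]
        have : (fun tu : List Char × Int => path ++ String.ofList tu.1)
            = (fun l : List Char => path ++ String.ofList l) ∘ Prod.fst := rfl
        rw [show (Prod.fst ∘ fun tu : List Char × Int =>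
              (path ++ String.ofList tu.1, unis * tu.2))
            = (fun l : List Char => path ++ String.ofList l) ∘ Prod.fst from rfl]
        rw [← List.map_map]
        exact List.Nodup.map (pv_ofList_inj path) (pvQ_keys_nodup (n + 1) pos score h)
      exact pvDictOf_items _ hnodup


lemma pvA_final (cur_pos : Int) :
    get_win_length_count cur_pos = (pvAgg (pvL cur_pos 0) PySem.Dict.empty).items := by
  show ((get_win_paths cur_pos 0 "" 1).items.foldl _ PySem.Dict.empty).items = _
  rw [pvA_items 21 cur_pos 0 "" 1 (by norm_num)]
  apply congrArg (fun d : PySem.Dict Int Int => d.items)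
  show _ = List.foldl _ PySem.Dict.empty (pvL cur_pos 0)
  rw [pvL, List.foldl_map, List.foldl_map]
  apply PySem.List.foldl_congr_mem
  intro acc tu _
  have hlen : PySem.Str.len ("" ++ String.ofList tu.1) = (tu.1.length : Int) := by
    rw [PySem.Str.len_eq]
    simp
  show (let pathlen := PySem.Str.len ("" ++ String.ofList tu.1);
        if acc.contains pathlen then acc.insert pathlen (acc.getD pathlen 0 + 1 * tu.2)
        else acc.insert pathlen (1 * tu.2)) = _
  simp only [hlen]
  by_cases hc : acc.contains ((tu.1.length : Int)) = true
  · simp [hc]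
  · have hcf : acc.contains ((tu.1.length : Int)) = false := by simpa using hc
    simp [hcf, PySem.Dict.getD_of_not_contains acc 0 hcf]


-- the body of B's inner per-state computation, exactly as the port writes it
def pvResTerm (table : PySem.Dict (Int × Int) (PySem.Dict Int Int)) (pos score : Int) :
    PySem.Dict Int Int :=
  pvRolls.foldl (fun res rw =>
    let npos := PySem.Int.mod (pos + rw.1 - 1) 10 + 1
    let nscore := score + npos
    let sub : PySem.Dict Int Int :=
      if 21 ≤ nscore then PySem.Dict.ofList [(0, 1)]
      else table.getD (npos, nscore) PySem.Dict.empty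
    sub.items.foldl (fun res tu =>
      res.insert (tu.1 + 1) (res.getD (tu.1 + 1) 0 + tu.2 * rw.2)) res) PySem.Dict.empty

def pvStepScore (table : PySem.Dict (Int × Int) (PySem.Dict Int Int)) (score : Int) :
    PySem.Dict (Int × Int) (PySem.Dict Int Int) :=
  (PySem.List.pyRange 1 11 1).foldl
    (fun table pos => table.insert (pos, score) (pvResTerm table pos score)) table

lemma pvB_unfold (cur_pos : Int) :
    get_win_length_count_alt cur_pos =
      (((PySem.List.pyRange 20 (-1) (-1)).foldl pvStepScore PySem.Dict.empty).getD
        (PySem.Int.mod (cur_pos - 1) 10 + 1, 0) PySem.Dict.empty).items := rfl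

lemma pvCR (table : PySem.Dict (Int × Int) (PySem.Dict Int Int)) (pos score : Int)
    (hs : 0 ≤ score) (hs2 : score ≤ 20)
    (hT : ∀ p σ : Int, 1 ≤ p → p ≤ 10 → score < σ → σ ≤ 20 →
      table.getD (p, σ) PySem.Dict.empty = pvS p σ) :
    pvResTerm table pos score = pvS pos score := by
  rw [pvS_rec _ _ (by omega)]
  apply PySem.List.foldl_congr_mem
  intro acc rw _
  have hm1 := PySem.Int.mod_nonneg (pos + rw.1 - 1) (b := 10) (by norm_num)
  have hm2 := PySem.Int.mod_lt (pos + rw.1 - 1) (b := 10) (by norm_num)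
  have hsub : (if 21 ≤ score + (PySem.Int.mod (pos + rw.1 - 1) 10 + 1) then
        PySem.Dict.ofList [(0, 1)]
      else table.getD (PySem.Int.mod (pos + rw.1 - 1) 10 + 1,
        score + (PySem.Int.mod (pos + rw.1 - 1) 10 + 1)) PySem.Dict.empty)
      = pvS (PySem.Int.mod (pos + rw.1 - 1) 10 + 1)
            (score + (PySem.Int.mod (pos + rw.1 - 1) 10 + 1)) := by
    by_cases hge : 21 ≤ score + (PySem.Int.mod (pos + rw.1 - 1) 10 + 1)
    · rw [if_pos hge, pvS_base _ _ hge]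
    · rw [if_neg hge]
      exact hT _ _ (by omega) (by omega) (by omega) (by omega)
  show (PySem.Dict.items (if 21 ≤ score + (PySem.Int.mod (pos + rw.1 - 1) 10 + 1) then
          PySem.Dict.ofList [(0, 1)]
        else table.getD (PySem.Int.mod (pos + rw.1 - 1) 10 + 1,
          score + (PySem.Int.mod (pos + rw.1 - 1) 10 + 1)) PySem.Dict.empty)).foldl
        (fun res tu => res.insert (tu.1 + 1) (res.getD (tu.1 + 1) 0 + tu.2 * rw.2)) acc = _
  rw [hsub, pvAgg, List.foldl_map]

lemma pvInner (score : Int) (hs : 0 ≤ score) (hs2 : score ≤ 20) :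
    ∀ (l : List Int) (table : PySem.Dict (Int × Int) (PySem.Dict Int Int)),
    (∀ p σ : Int, 1 ≤ p → p ≤ 10 → score < σ → σ ≤ 20 →
      table.getD (p, σ) PySem.Dict.empty = pvS p σ) →
    (∀ p σ : Int, σ ≠ score →
      (l.foldl (fun table pos => table.insert (pos, score) (pvResTerm table pos score)) table).getD
        (p, σ) PySem.Dict.empty = table.getD (p, σ) PySem.Dict.empty)
    ∧ (∀ p : Int, table.getD (p, score) PySem.Dict.empty = pvS p score →
      (l.foldl (fun table pos => table.insert (pos, score) (pvResTerm table pos score)) table).getD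
        (p, score) PySem.Dict.empty = pvS p score)
    ∧ (∀ p ∈ l,
      (l.foldl (fun table pos => table.insert (pos, score) (pvResTerm table pos score)) table).getD
        (p, score) PySem.Dict.empty = pvS p score) := by
  intro l
  induction l with
  | nil => exact fun table _ => ⟨fun _ _ _ => rfl, fun _ h => h, fun p hp => absurd hp (by simp)⟩
  | cons pos l' ih =>
    intro table hT
    have hres : pvResTerm table pos score = pvS pos score := pvCR table pos score hs hs2 hT
    have hT1 : ∀ p σ : Int, 1 ≤ p → p ≤ 10 → score < σ → σ ≤ 20 →
        (table.insert (pos, score) (pvResTerm table pos score)).getD (p, σ) PySem.Dict.empty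
          = pvS p σ := by
      intro p σ h1 h2 h3 h4
      rw [PySem.Dict.getD_insert]
      rw [if_neg (by intro hpq; injection hpq with _ hq; omega)]
      exact hT p σ h1 h2 h3 h4
    obtain ⟨ih1, ih2, ih3⟩ := ih (table.insert (pos, score) (pvResTerm table pos score)) hT1
    refine ⟨?_, ?_, ?_⟩
    · intro p σ hσ
      rw [List.foldl_cons, ih1 p σ hσ, PySem.Dict.getD_insert,
          if_neg (by intro hpq; injection hpq with _ hq; omega)]
    · intro p hp
      rw [List.foldl_cons]
      apply ih2
      rw [PySem.Dict.getD_insert]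
      by_cases hpp : p = pos
      · rw [if_pos (by rw [hpp]), hres, hpp]
      · rw [if_neg (by intro hpq; injection hpq with hq _; exact hpp hq)]
        exact hp
    · intro p hp
      rw [List.foldl_cons]
      rcases List.mem_cons.mp hp with hpp | hpl
      · apply ih2
        rw [hpp, PySem.Dict.getD_insert, if_pos rfl, hres]
      · exact ih3 p hpl

def pvDesc (s : Nat) : List Int := (List.range (s + 1)).reverse.map Int.ofNat

lemma pvDesc_succ (s : Nat) : pvDesc (s + 1) = ((s : Int) + 1) :: pvDesc s := by
  simp [pvDesc, List.range_succ]

lemma pv_mem_range110 : ∀ p : Int, 1 ≤ p → p ≤ 10 → p ∈ PySem.List.pyRange 1 11 1 := by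
  intro p h1 h2
  have h : PySem.List.pyRange 1 11 1 = [1, 2, 3, 4, 5, 6, 7, 8, 9, 10] := by decide
  rw [h]
  simp only [List.mem_cons, List.not_mem_nil, or_false]
  omega

lemma pvOuter : ∀ (s : Nat), s ≤ 20 →
    ∀ (table : PySem.Dict (Int × Int) (PySem.Dict Int Int)),
    (∀ p σ : Int, 1 ≤ p → p ≤ 10 → (s : Int) < σ → σ ≤ 20 →
      table.getD (p, σ) PySem.Dict.empty = pvS p σ) →
    ∀ p σ : Int, 1 ≤ p → p ≤ 10 → 0 ≤ σ → σ ≤ 20 →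
      ((pvDesc s).foldl pvStepScore table).getD (p, σ) PySem.Dict.empty = pvS p σ := by
  intro s
  induction s with
  | zero =>
    intro _ table hT p σ h1 h2 h3 h4
    show ([(0 : Int)].foldl pvStepScore table).getD (p, σ) PySem.Dict.empty = pvS p σ
    rw [List.foldl_cons, List.foldl_nil]
    obtain ⟨i1, i2, i3⟩ := pvInner 0 (by norm_num) (by norm_num) (PySem.List.pyRange 1 11 1) table hT
    by_cases hσ : σ = 0
    · rw [hσ]
      exact i3 p (pv_mem_range110 p h1 h2)
    · rw [pvStepScore, i1 p σ hσ]
      exact hT p σ h1 h2 (by omega) h4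
  | succ n ih =>
    intro hn table hT p σ h1 h2 h3 h4
    have hT' : ∀ p σ : Int, 1 ≤ p → p ≤ 10 → (n : Int) + 1 < σ → σ ≤ 20 →
        table.getD (p, σ) PySem.Dict.empty = pvS p σ := by
      intro p' σ' a b c d
      exact hT p' σ' a b (by push_cast; omega) d
    rw [pvDesc_succ, List.foldl_cons]
    refine ih (by omega) _ ?_ p σ h1 h2 h3 h4
    intro p' σ' h1' h2' h3' h4'
    obtain ⟨i1, i2, i3⟩ := pvInner ((n : Int) + 1) (by omega) (by omega)
      (PySem.List.pyRange 1 11 1) table hT'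
    by_cases hσ' : σ' = (n : Int) + 1
    · rw [pvStepScore, hσ']
      exact i3 p' (pv_mem_range110 p' h1' h2')
    · rw [pvStepScore, i1 p' σ' hσ']
      exact hT' p' σ' h1' h2' (by omega) h4'

lemma pvS_norm (cur_pos : Int) :
    pvS cur_pos 0 = pvS (PySem.Int.mod (cur_pos - 1) 10 + 1) 0 := by
  rw [pvS_rec _ _ (by norm_num), pvS_rec _ _ (by norm_num)]
  apply PySem.List.foldl_congr_mem
  intro acc rw _
  have hmod : PySem.Int.mod (cur_pos + rw.1 - 1) 10
      = PySem.Int.mod (PySem.Int.mod (cur_pos - 1) 10 + 1 + rw.1 - 1) 10 := by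
    rw [PySem.Int.mod_eq_emod_of_pos (by norm_num),
        PySem.Int.mod_eq_emod_of_pos (by norm_num),
        PySem.Int.mod_eq_emod_of_pos (by norm_num)]
    omega
  rw [hmod]

lemma pvB_final (cur_pos : Int) :
    get_win_length_count_alt cur_pos = (pvS cur_pos 0).items := by
  rw [pvB_unfold]
  have hdesc : PySem.List.pyRange 20 (-1) (-1) = pvDesc 20 := by decide
  have hm1 := PySem.Int.mod_nonneg (cur_pos - 1) (b := 10) (by norm_num)
  have hm2 := PySem.Int.mod_lt (cur_pos - 1) (b := 10) (by norm_num)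
  rw [hdesc]
  rw [pvOuter 20 (by norm_num) PySem.Dict.empty
      (fun p σ _ _ hlt hle => absurd (lt_of_lt_of_le hlt hle) (by norm_num))
      (PySem.Int.mod (cur_pos - 1) 10 + 1) 0 (by omega) (by omega) (by norm_num) (by norm_num)]
  rw [← pvS_norm]


-- ===== VERDICT (by name: the statement is the Claim_ definition above) =====
theorem get_win_length_count_spec : Claim_equal_get_win_length_count := by
  intro cur_pos _
  unfold Spec_get_win_length_count
  rw [pvA_final, ← pvM 21 cur_pos 0 (by norm_num), pvB_final]
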